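-- pv_equiv track=rewrite | github.com/DewanshTrip/Friend-Finder | FriendFinderAlgo.py | calc_similarity_scores
-- ===== SOURCE A (Python) =====
-- def calc_similarity_scores(network):
--     ''' Remember the docstring'''
--     n = len(network)
--     similarity_matrix = [[0] * n for i in range(n)]
--
--     for user1 in range(n):
--         for user2 in range(user1 + 1, n):
--             common_friends = 0
--             for friend1 in network[user1]:
--                 if friend1 in network[user2]:
--                     common_friends += 1
--
--             similarity_matrix[user1][user2] = common_friends
--             similarity_matrix[user2][user1] = common_friends
--
--     for user in range(n):
--         total_friends = len(network[user])
--         similarity_matrix[user][user] = total_friends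
--
--     return similarity_matrix
-- ===== SOURCE B (Python) =====
-- def calc_similarity_scores(network):
--     n = len(network)
--     # inverted index: owners[f] = users whose friend set contains f (ascending)
--     owners = {}
--     for j in range(n):
--         for f in set(network[j]):
--             owners.setdefault(f, []).append(j)
--     matrix = [[0] * n for _ in range(n)]
--     for i in range(n):
--         for f in network[i]:
--             for j in owners.get(f, []):
--                 if j > i:
--                     matrix[i][j] += 1
--                     matrix[j][i] += 1
--     for i in range(n):
--         matrix[i][i] = len(network[i])
--     return matrix
-- ===== Notes on version B (the rewrite author's own statement) =====
-- stated objective: faster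
-- what changed: Replaces A's scan of all O(n^2) user pairs with a list-membership rescan per pair by an inverted index owners[f] (users whose friend set contains f): each user's raw friend list walks straight to the users sharing that friend and increments both symmetric cells, diagonal set at the end.
import Mathlib
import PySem

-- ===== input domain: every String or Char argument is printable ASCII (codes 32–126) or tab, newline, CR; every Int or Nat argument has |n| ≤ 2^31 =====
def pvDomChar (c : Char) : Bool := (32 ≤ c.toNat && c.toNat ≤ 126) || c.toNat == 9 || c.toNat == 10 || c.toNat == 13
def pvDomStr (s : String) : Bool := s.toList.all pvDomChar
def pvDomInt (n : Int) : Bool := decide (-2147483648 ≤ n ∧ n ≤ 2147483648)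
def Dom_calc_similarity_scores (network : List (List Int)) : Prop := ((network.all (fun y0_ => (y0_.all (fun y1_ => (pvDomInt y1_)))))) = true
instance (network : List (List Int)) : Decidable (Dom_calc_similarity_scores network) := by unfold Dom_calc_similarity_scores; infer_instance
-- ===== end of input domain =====

-- B replaces A's O(n^2) pairwise rescans by an inverted index owners[f] -> users whose friend
-- set contains f, reaching each shared friend directly (objective: faster on typical inputs).

-- ===== PORT A =====
-- matrix[i][j] = v  (all indices produced by the loops are in range, so Nat indexing is exact)
def pvSetCell (m : List (List Int)) (i j : Nat) (v : Int) : List (List Int) :=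
  m.modify i (fun row => row.set j v)

-- 'common_friends': for friend1 in l1: if friend1 in l2: common_friends += 1
def pvCountIn (l1 l2 : List Int) : Int :=
  l1.foldl (fun c friend1 => if friend1 ∈ l2 then c + 1 else c) 0

def calc_similarity_scores (network : List (List Int)) : List (List Int) :=
  let n := network.length
  let m0 := (List.range n).map (fun _ => List.replicate n (0 : Int))
  let m1 := (List.range n).foldl (fun m user1 =>
      (List.range' (user1 + 1) (n - (user1 + 1))).foldl (fun m user2 =>
        let common := pvCountIn (network.getD user1 []) (network.getD user2 [])
        pvSetCell (pvSetCell m user1 user2 common) user2 user1 common) m) m0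
  (List.range n).foldl (fun m user =>
      pvSetCell m user user ((network.getD user []).length : Int)) m1

-- ===== PORT B =====
-- matrix[i][j] += 1
def pvIncCell (m : List (List Int)) (i j : Nat) : List (List Int) :=
  m.modify i (fun row => row.modify j (fun x => x + 1))

def calc_similarity_scores_alt (network : List (List Int)) : List (List Int) :=
  let n := network.length
  -- owners[f] = ascending list of users whose friend set contains f
  let owners := (List.range n).foldl (fun d j =>
      (PySem.Set.ofList (network.getD j [])).foldl
        (fun d f => PySem.Dict.modify d f [] (fun l => l ++ [j])) d)
    (PySem.Dict.empty : PySem.Dict Int (List Nat))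
  let m0 := (List.range n).map (fun _ => List.replicate n (0 : Int))
  let m1 := (List.range n).foldl (fun m i =>
      (network.getD i []).foldl (fun m f =>
        (owners.getD f []).foldl (fun m j =>
          if i < j then pvIncCell (pvIncCell m i j) j i else m) m) m) m0
  (List.range n).foldl (fun m i =>
      pvSetCell m i i ((network.getD i []).length : Int)) m1

-- ===== PRECONDITION & SPEC =====
def Spec_calc_similarity_scores (network : List (List Int)) (out : List (List Int)) : Prop := out = calc_similarity_scores_alt network
instance (network : List (List Int)) (out : List (List Int)) : Decidable (Spec_calc_similarity_scores network out) := by unfold Spec_calc_similarity_scores; infer_instance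

-- ===== CLAIM (what is proved, stated in full; the proofs are below) =====
def Claim_equal_calc_similarity_scores : Prop := ∀ (network : List (List Int)), Dom_calc_similarity_scores network → Spec_calc_similarity_scores network (calc_similarity_scores network)

-- ===== LEMMAS AND PROOFS =====

-- an n×n matrix as the tabulation of a function on positions
def pvMat (n : Nat) (g : Nat → Nat → Int) : List (List Int) :=
  (List.range n).map (fun a => (List.range n).map (fun b => g a b))

theorem pvMat_zero (n : Nat) :
    (List.range n).map (fun _ => List.replicate n (0 : Int)) = pvMat n (fun _ _ => 0) := by
  simp [pvMat]

theorem pvMat_congr {n : Nat} {g g' : Nat → Nat → Int}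
    (h : ∀ a b, a < n → b < n → g a b = g' a b) : pvMat n g = pvMat n g' := by
  simp only [pvMat]
  refine List.map_congr_left ?_
  intro a ha
  refine List.map_congr_left ?_
  intro b hb
  exact h a b (List.mem_range.1 ha) (List.mem_range.1 hb)

set_option maxRecDepth 4096 in
theorem pvSetCell_mat (n : Nat) (g : Nat → Nat → Int) (i j : Nat) (v : Int) :
    pvSetCell (pvMat n g) i j v = pvMat n (fun a b => if a = i ∧ b = j then v else g a b) := by
  apply List.ext_getElem
  · simp [pvSetCell, pvMat]
  · intro a h1 h2
    simp only [pvMat, List.length_map, List.length_range] at h2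
    simp only [pvSetCell, pvMat, List.getElem_modify, List.getElem_map, List.getElem_range]
    split_ifs with hi
    · apply List.ext_getElem
      · simp
      · intro b hb1 hb2
        simp only [List.length_map, List.length_range] at hb2
        simp only [List.getElem_set, List.getElem_map, List.getElem_range]
        subst hi
        split_ifs with h3 h4 h4
        · rfl
        · exact absurd ⟨rfl, h3.symm⟩ h4
        · exact absurd h4.2.symm h3
        · rfl
    · apply List.ext_getElem
      · simp
      · intro b hb1 hb2
        simp only [List.length_map, List.length_range] at hb2
        simp only [List.getElem_map, List.getElem_range]
        split_ifs with h3
        · exact absurd h3.1.symm hi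
        · rfl

set_option maxRecDepth 4096 in
theorem pvIncCell_mat (n : Nat) (g : Nat → Nat → Int) (i j : Nat) :
    pvIncCell (pvMat n g) i j = pvMat n (fun a b => if a = i ∧ b = j then g a b + 1 else g a b) := by
  apply List.ext_getElem
  · simp [pvIncCell, pvMat]
  · intro a h1 h2
    simp only [pvMat, List.length_map, List.length_range] at h2
    simp only [pvIncCell, pvMat, List.getElem_modify, List.getElem_map, List.getElem_range]
    split_ifs with hi
    · apply List.ext_getElem
      · simp
      · intro b hb1 hb2
        simp only [List.length_map, List.length_range] at hb2
        simp only [List.getElem_modify, List.getElem_map, List.getElem_range]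
        subst hi
        split_ifs with h3 h4 h4
        · rfl
        · exact absurd ⟨rfl, h3.symm⟩ h4
        · exact absurd h4.2.symm h3
        · rfl
    · apply List.ext_getElem
      · simp
      · intro b hb1 hb2
        simp only [List.length_map, List.length_range] at hb2
        simp only [List.getElem_map, List.getElem_range]
        split_ifs with h3
        · exact absurd h3.1.symm hi
        · rfl

-- lift a matrix-valued fold to a fold over position functions
theorem pvFoldl_mat {β : Type} (n : Nat) (L : List β)
    (F : List (List Int) → β → List (List Int)) (G : (Nat → Nat → Int) → β → (Nat → Nat → Int))
    (h : ∀ g x, x ∈ L → F (pvMat n g) x = pvMat n (G g x)) (g0 : Nat → Nat → Int) :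
    L.foldl F (pvMat n g0) = pvMat n (L.foldl G g0) := by
  induction L generalizing g0 with
  | nil => rfl
  | cons x L ih =>
    simp only [List.foldl_cons]
    rw [h g0 x (by simp), ih]
    intro g y hy
    exact h g y (by simp [hy])

-- ---- characterization of A ----

-- inner-loop step of A at the position-function level (for fixed user1)
def pvGA1 (network : List (List Int)) (u1 : Nat) (g : Nat → Nat → Int) (u2 : Nat) :
    Nat → Nat → Int :=
  fun a b =>
    if a = u2 ∧ b = u1 then pvCountIn (network.getD u1 []) (network.getD u2 [])
    else if a = u1 ∧ b = u2 then pvCountIn (network.getD u1 []) (network.getD u2 [])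
    else g a b

set_option maxHeartbeats 2000000 in
set_option maxRecDepth 4096 in
theorem pvA_inner (network : List (List Int)) (u1 : Nat) (L : List Nat)
    (hL : ∀ x ∈ L, u1 < x) (g : Nat → Nat → Int) :
    L.foldl (pvGA1 network u1) g = fun a b =>
      if a = u1 ∧ b ∈ L then pvCountIn (network.getD u1 []) (network.getD b [])
      else if b = u1 ∧ a ∈ L then pvCountIn (network.getD u1 []) (network.getD a [])
      else g a b := by
  induction L generalizing g with
  | nil => funext a b; simp
  | cons x L ih =>
    simp only [List.foldl_cons]
    rw [ih (fun y hy => hL y (by simp [hy]))]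
    funext a b
    have hx : u1 < x := hL x (by simp)
    by_cases hau : a = u1 <;> by_cases hbu : b = u1 <;>
      by_cases hax : a = x <;> by_cases hbx : b = x <;>
      by_cases haL : a ∈ L <;> by_cases hbL : b ∈ L <;>
      simp_all [pvGA1, List.mem_cons]

-- outer double loop of A: the off-diagonal entries
set_option maxHeartbeats 2000000 in
set_option maxRecDepth 4096 in
theorem pvA_outer (network : List (List Int)) (k : Nat) (hk : k ≤ network.length) :
    (List.range k).foldl (fun g u1 =>
        (List.range' (u1 + 1) (network.length - (u1 + 1))).foldl (pvGA1 network u1) g)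
      (fun _ _ => (0 : Int)) = fun a b =>
      if a ≠ b ∧ a < network.length ∧ b < network.length ∧ min a b < k then
        pvCountIn (network.getD (min a b) []) (network.getD (max a b) [])
      else 0 := by
  induction k with
  | zero => funext a b; simp
  | succ k ih =>
    rw [List.range_succ, List.foldl_append]
    simp only [List.foldl_cons, List.foldl_nil]
    rw [ih (by omega)]
    rw [pvA_inner network k _ (fun x hx => (List.mem_range'_1.1 hx).1)]
    funext a b
    have hkn : k < network.length := hk
    have hmem : ∀ y : Nat, y ∈ List.range' (k + 1) (network.length - (k + 1)) ↔
        (k + 1 ≤ y ∧ y < network.length) := by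
      intro y; rw [List.mem_range'_1]; omega
    simp only [hmem, Nat.min_def, Nat.max_def]
    split_ifs <;> first | rfl | omega | simp_all

-- the trailing diagonal loop (shared shape by A and B)
theorem pvDiag (network : List (List Int)) (k : Nat) (g : Nat → Nat → Int) :
    (List.range k).foldl (fun g u => fun a b =>
        if a = u ∧ b = u then ((network.getD u []).length : Int) else g a b) g = fun a b =>
      if a = b ∧ a < k then ((network.getD a []).length : Int) else g a b := by
  induction k generalizing g with
  | zero => funext a b; simp
  | succ k ih =>
    rw [List.range_succ, List.foldl_append]
    simp only [List.foldl_cons, List.foldl_nil]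
    rw [ih]
    funext a b
    split_ifs <;> simp_all <;> omega

theorem pvA_char (network : List (List Int)) :
    calc_similarity_scores network = pvMat network.length (fun a b =>
      if a = b ∧ a < network.length then ((network.getD a []).length : Int)
      else if a ≠ b ∧ a < network.length ∧ b < network.length ∧
          min a b < network.length then
        pvCountIn (network.getD (min a b) []) (network.getD (max a b) [])
      else 0) := by
  show (List.range network.length).foldl _
      ((List.range network.length).foldl _
        ((List.range network.length).map (fun _ => List.replicate network.length (0 : Int)))) = _
  rw [pvMat_zero]
  rw [pvFoldl_mat network.length _ _
    (fun g u1 => (List.range' (u1 + 1) (network.length - (u1 + 1))).foldl (pvGA1 network u1) g)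
    (by
      intro g u1 _
      exact pvFoldl_mat network.length _ _ (pvGA1 network u1)
        (by
          intro g' u2 _
          show pvSetCell (pvSetCell (pvMat network.length g') u1 u2
              (pvCountIn (network.getD u1 []) (network.getD u2 []))) u2 u1
              (pvCountIn (network.getD u1 []) (network.getD u2 [])) = _
          rw [pvSetCell_mat, pvSetCell_mat]
          rfl) g)]
  rw [pvFoldl_mat network.length _ _
    (fun g u => fun a b => if a = u ∧ b = u then ((network.getD u []).length : Int) else g a b)
    (by
      intro g u _
      rw [pvSetCell_mat]) _]
  rw [pvA_outer network network.length (le_refl _), pvDiag]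

-- ---- characterization of B ----

def pvOwners (network : List (List Int)) : PySem.Dict Int (List Nat) :=
  (List.range network.length).foldl (fun d j =>
      (PySem.Set.ofList (network.getD j [])).foldl
        (fun d f => PySem.Dict.modify d f [] (fun l => l ++ [j])) d)
    PySem.Dict.empty

theorem pvOwners_inner (S : List Int) (hS : S.Nodup) (j : Nat)
    (d : PySem.Dict Int (List Nat)) (f : Int) :
    (S.foldl (fun d f => PySem.Dict.modify d f [] (fun l => l ++ [j])) d).getD f []
      = d.getD f [] ++ (if f ∈ S then [j] else []) := by
  induction S generalizing d with
  | nil => simp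
  | cons f0 S ih =>
    simp only [List.foldl_cons]
    rw [ih (List.nodup_cons.1 hS).2]
    rw [PySem.Dict.getD_modify]
    by_cases hf : f = f0
    · subst hf
      have : f ∉ S := (List.nodup_cons.1 hS).1
      simp [this]
    · simp [hf, List.mem_cons]

theorem pvOwners_getD (network : List (List Int)) (f : Int) :
    (pvOwners network).getD f []
      = (List.range network.length).filter (fun j => decide (f ∈ network.getD j [])) := by
  unfold pvOwners
  suffices h : ∀ k (d : PySem.Dict Int (List Nat)),
      ((List.range k).foldl (fun d j =>
        (PySem.Set.ofList (network.getD j [])).foldl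
          (fun d f => PySem.Dict.modify d f [] (fun l => l ++ [j])) d) d).getD f []
      = d.getD f [] ++ (List.range k).filter (fun j => decide (f ∈ network.getD j [])) by
    rw [h]; simp
  intro k
  induction k with
  | zero => intro d; simp
  | succ k ih =>
    intro d
    rw [List.range_succ, List.foldl_append]
    simp only [List.foldl_cons, List.foldl_nil]
    rw [pvOwners_inner _ (PySem.Set.nodup_ofList _) k, ih, List.filter_append]
    rw [List.append_assoc]
    by_cases h : f ∈ network.getD k [] <;>
      simp [PySem.Set.mem_ofList, List.filter_cons]

theorem pvOwners_mem (network : List (List Int)) (f : Int) (j : Nat) :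
    j ∈ (pvOwners network).getD f [] ↔ j < network.length ∧ f ∈ network.getD j [] := by
  rw [pvOwners_getD]
  simp [List.mem_filter, List.mem_range]

theorem pvOwners_nodup (network : List (List Int)) (f : Int) :
    ((pvOwners network).getD f []).Nodup := by
  rw [pvOwners_getD]
  exact (List.nodup_range).filter _

-- B's innermost loop at the position-function level (fixed i, one shared friend f)
def pvGB1 (i : Nat) (g : Nat → Nat → Int) (j : Nat) : Nat → Nat → Int :=
  fun a b =>
    if i < j then
      (if a = j ∧ b = i then
          (if a = i ∧ b = j then g a b + 1 else g a b) + 1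
        else (if a = i ∧ b = j then g a b + 1 else g a b))
    else g a b

set_option maxHeartbeats 2000000 in
set_option maxRecDepth 4096 in
theorem pvB_inner (i : Nat) (J : List Nat) (hJ : J.Nodup) (g : Nat → Nat → Int) :
    J.foldl (pvGB1 i) g = fun a b =>
      g a b + (if a = i ∧ b ∈ J ∧ i < b then 1 else 0)
            + (if b = i ∧ a ∈ J ∧ i < a then 1 else 0) := by
  induction J generalizing g with
  | nil => funext a b; simp
  | cons j J ih =>
    simp only [List.foldl_cons]
    rw [ih (List.nodup_cons.1 hJ).2]
    funext a b
    have hjJ : j ∉ J := (List.nodup_cons.1 hJ).1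
    simp only [pvGB1, List.mem_cons]
    by_cases haj : a = j <;> by_cases hbj : b = j <;>
      by_cases haJ : a ∈ J <;> by_cases hbJ : b ∈ J <;>
      simp only [haj, hbj, haJ, hbJ, hjJ, or_true, or_false, true_and,
        and_true, false_and, and_false, if_false] <;>
      try split_ifs <;> try omega

-- count of users j > i sharing friend f with user i, accumulated over the raw friend list
set_option maxHeartbeats 2000000 in
set_option maxRecDepth 4096 in
theorem pvB_middle (network : List (List Int)) (i : Nat) (fs : List Int)
    (g : Nat → Nat → Int) :
    fs.foldl (fun g f => ((pvOwners network).getD f []).foldl (pvGB1 i) g) g = fun a b =>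
      g a b
      + (if a = i ∧ i < b then
          (fs.countP (fun f => decide (b ∈ (pvOwners network).getD f [])) : Int) else 0)
      + (if b = i ∧ i < a then
          (fs.countP (fun f => decide (a ∈ (pvOwners network).getD f [])) : Int) else 0) := by
  induction fs generalizing g with
  | nil => funext a b; simp
  | cons f0 fs ih =>
    simp only [List.foldl_cons]
    rw [ih]
    funext a b
    rw [pvB_inner i _ (pvOwners_nodup network f0)]
    simp only [List.countP_cons]
    by_cases hai : a = i <;> by_cases hbi : b = i <;>
      by_cases hib : i < b <;> by_cases hia : i < a <;>
      by_cases hbo : b ∈ (pvOwners network).getD f0 [] <;>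
      by_cases hao : a ∈ (pvOwners network).getD f0 [] <;>
      simp_all <;> omega

set_option maxHeartbeats 2000000 in
set_option maxRecDepth 4096 in
theorem pvB_outer (network : List (List Int)) (k : Nat) :
    (List.range k).foldl (fun g i =>
        (network.getD i []).foldl
          (fun g f => ((pvOwners network).getD f []).foldl (pvGB1 i) g) g)
      (fun _ _ => (0 : Int)) = fun a b =>
      if a < b ∧ a < k then
        ((network.getD a []).countP (fun f => decide (b ∈ (pvOwners network).getD f [])) : Int)
      else if b < a ∧ b < k then
        ((network.getD b []).countP (fun f => decide (a ∈ (pvOwners network).getD f [])) : Int)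
      else 0 := by
  induction k with
  | zero => funext a b; simp
  | succ k ih =>
    rw [List.range_succ, List.foldl_append]
    simp only [List.foldl_cons, List.foldl_nil]
    rw [ih, pvB_middle]
    funext a b
    by_cases hak : a = k <;> by_cases hbk : b = k <;>
      split_ifs <;> simp_all <;> omega

theorem pvB_char (network : List (List Int)) :
    calc_similarity_scores_alt network = pvMat network.length (fun a b =>
      if a = b ∧ a < network.length then ((network.getD a []).length : Int)
      else if a < b ∧ a < network.length then
        ((network.getD a []).countP (fun f => decide (b ∈ (pvOwners network).getD f [])) : Int)
      else if b < a ∧ b < network.length then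
        ((network.getD b []).countP (fun f => decide (a ∈ (pvOwners network).getD f [])) : Int)
      else 0) := by
  show (List.range network.length).foldl _
      ((List.range network.length).foldl _
        ((List.range network.length).map (fun _ => List.replicate network.length (0 : Int)))) = _
  rw [pvMat_zero]
  rw [pvFoldl_mat network.length _ _
    (fun g i => (network.getD i []).foldl
      (fun g f => ((pvOwners network).getD f []).foldl (pvGB1 i) g) g)
    (by
      intro g i _
      refine pvFoldl_mat network.length _ _ _ ?_ g
      intro g' f _
      refine pvFoldl_mat network.length _ _ (pvGB1 i) ?_ g'
      intro g'' j _
      by_cases h : i < j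
      · rw [if_pos h, pvIncCell_mat, pvIncCell_mat]
        refine congrArg (pvMat network.length) ?_
        funext a b
        simp [pvGB1, h]
      · rw [if_neg h]
        refine congrArg (pvMat network.length) ?_
        funext a b
        simp [pvGB1, h])]
  rw [pvFoldl_mat network.length _ _
    (fun g u => fun a b => if a = u ∧ b = u then ((network.getD u []).length : Int) else g a b)
    (by
      intro g u _
      rw [pvSetCell_mat]) _]
  rw [pvB_outer network network.length, pvDiag]

theorem pvCountIn_eq_countP (l1 l2 : List Int) :
    pvCountIn l1 l2 = (l1.countP (fun f => decide (f ∈ l2)) : Int) := by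
  have h := PySem.List.foldl_count_if (fun f => decide (f ∈ l2)) l1 0
  simpa [pvCountIn] using h

-- ===== VERDICT (by name: the statement is the Claim_ definition above) =====
theorem calc_similarity_scores_spec : Claim_equal_calc_similarity_scores := by
  intro network _
  unfold Spec_calc_similarity_scores
  rw [pvA_char, pvB_char]
  apply pvMat_congr
  intro a b ha hb
  by_cases hab : a = b
  · simp [hab, hb]
  · have hcong : ∀ lo hi : Nat, hi < network.length →
        ((network.getD lo []).countP (fun f => decide (hi ∈ (pvOwners network).getD f [])) : Int)
          = pvCountIn (network.getD lo []) (network.getD hi []) := by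
      intro lo hi hhi
      rw [pvCountIn_eq_countP]
      congr 1
      apply List.countP_congr
      intro f _
      simp [pvOwners_mem, hhi]
    rcases Nat.lt_or_ge a b with h | h
    · have hmin : min a b = a := by omega
      have hmax : max a b = b := by omega
      simp only [hmin, hmax]
      rw [if_neg (fun hc => hab hc.1), if_pos ⟨hab, ha, hb, by omega⟩,
        if_neg (fun hc => hab hc.1), if_pos ⟨h, ha⟩, hcong a b hb]
    · have hba : b < a := by omega
      have hmin : min a b = b := by omega
      have hmax : max a b = a := by omega
      simp only [hmin, hmax]
      rw [if_neg (fun hc => hab hc.1), if_pos ⟨hab, ha, hb, by omega⟩,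
        if_neg (fun hc => hab hc.1), if_neg (by omega), if_pos ⟨hba, hb⟩, hcong b a ha]
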